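-- pv_equiv track=rewrite | github.com/bekzod/Whisper-Finetune | utils/tsv_parser.py | _detect_column_index
-- ===== SOURCE A (Python) =====
-- from typing import Any, Dict, Iterator, List, Optional, Sequence, TextIO, Tuple
--
-- def _detect_column_index(
--     header: Sequence[str], candidates: Sequence[str], default_idx: Optional[int]
-- ) -> Optional[int]:
--     """
--     Locate the index of the first matching candidate column in a normalized header.
--     """
--     normalized = {col.strip().lower(): idx for idx, col in enumerate(header) if col}
--     for candidate in candidates:
--         idx = normalized.get(candidate)
--         if idx is not None:
--             return idx
--     return default_idx
-- ===== SOURCE B (Python) =====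
-- def _detect_column_index(header, candidates, default_idx):
--     rank = {}
--     for i, cand in enumerate(candidates):
--         rank.setdefault(cand, i)
--     best_rank, best_idx = len(candidates), None
--     for idx, col in enumerate(header):
--         if col:
--             r = rank.get(col.strip().lower())
--             if r is not None and r <= best_rank:
--                 best_rank, best_idx = r, idx
--     return best_idx if best_idx is not None else default_idx
-- ===== Notes on version B (the rewrite author's own statement) =====
-- stated objective: alternative
-- what changed: Instead of indexing the header into a normalized-name dict and probing it candidate by candidate, B builds a candidate->priority table once and makes a single argmin pass over the header, keeping the column with the lowest candidate priority.
import Mathlib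
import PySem

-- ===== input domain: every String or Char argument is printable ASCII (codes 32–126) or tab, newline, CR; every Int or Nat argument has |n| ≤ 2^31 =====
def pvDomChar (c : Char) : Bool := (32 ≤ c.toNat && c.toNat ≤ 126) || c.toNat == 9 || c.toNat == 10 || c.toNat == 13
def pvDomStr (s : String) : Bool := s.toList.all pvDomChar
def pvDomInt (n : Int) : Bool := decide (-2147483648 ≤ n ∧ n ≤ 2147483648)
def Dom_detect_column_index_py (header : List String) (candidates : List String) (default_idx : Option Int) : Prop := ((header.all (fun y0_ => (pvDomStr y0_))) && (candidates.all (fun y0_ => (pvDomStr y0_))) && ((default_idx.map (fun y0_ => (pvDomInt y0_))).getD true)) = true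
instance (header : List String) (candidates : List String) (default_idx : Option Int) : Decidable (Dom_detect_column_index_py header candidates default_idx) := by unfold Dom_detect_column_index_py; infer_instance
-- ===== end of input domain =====

-- B replaces A's header-keyed dict + candidate loop by a candidate-rank table and a single
-- argmin pass over the header (lowest candidate rank wins): an alternative, dict-free-over-header
-- decomposition of the same search.


-- ===== PORT A =====
-- col.strip().lower()
def pvNorm (col : String) : String := PySem.Str.lower (PySem.Str.strip col)

-- 'for candidate in candidates: idx = normalized.get(candidate); if idx is not None: return idx'
def pvALoop (normalized : PySem.Dict String Int) : List String → Option Int → Option Int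
  | [], default_idx => default_idx
  | c :: cs, default_idx =>
      match normalized.get? c with
      | some idx => some idx
      | none => pvALoop normalized cs default_idx

def detect_column_index_py (header : List String) (candidates : List String) (default_idx : Option Int) : Option Int :=
  -- normalized = {col.strip().lower(): idx for idx, col in enumerate(header) if col}
  let normalized : PySem.Dict String Int :=
    (PySem.List.enumerate header 0).foldl
      (fun d p => if p.2 ≠ "" then d.insert (pvNorm p.2) p.1 else d) PySem.Dict.empty
  pvALoop normalized candidates default_idx

-- ===== PORT B =====
-- rank = {}; for i, cand in enumerate(candidates): rank.setdefault(cand, i)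
def pvRank (candidates : List String) : PySem.Dict String Int :=
  (PySem.List.enumerate candidates 0).foldl (fun d p => d.setdefault p.2 p.1) PySem.Dict.empty

-- loop body: 'if col: r = rank.get(col.strip().lower()); if r is not None and r <= best_rank: …'
def pvStep (rank : PySem.Dict String Int) (s : Int × Option Int) (p : Int × String) : Int × Option Int :=
  if p.2 ≠ "" then
    match rank.get? (pvNorm p.2) with
    | some r => if r ≤ s.1 then (r, some p.1) else s
    | none => s
  else s

def detect_column_index_py_alt (header : List String) (candidates : List String) (default_idx : Option Int) : Option Int :=
  let rank := pvRank candidates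
  let best := (PySem.List.enumerate header 0).foldl (pvStep rank) ((candidates.length : Int), none)
  match best.2 with
  | some i => some i
  | none => default_idx

-- ===== PRECONDITION & SPEC =====
def Spec_detect_column_index_py (header : List String) (candidates : List String) (default_idx : Option Int) (out : Option Int) : Prop := out = detect_column_index_py_alt header candidates default_idx
instance (header : List String) (candidates : List String) (default_idx : Option Int) (out : Option Int) : Decidable (Spec_detect_column_index_py header candidates default_idx out) := by unfold Spec_detect_column_index_py; infer_instance

-- ===== CLAIM =====
def Claim_equal_detect_column_index_py : Prop := ∀ (header : List String) (candidates : List String) (default_idx : Option Int), Dom_detect_column_index_py header candidates default_idx → Spec_detect_column_index_py header candidates default_idx (detect_column_index_py header candidates default_idx)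

-- ===== LEMMAS AND PROOFS =====

-- last index in header whose non-empty normalized column equals c (the value A's dict stores at key c)
def pvBScan (header : List String) (c : String) : Option Int :=
  (PySem.List.enumerate header 0).foldl
    (fun found p => if p.2 ≠ "" ∧ pvNorm p.2 = c then some p.1 else found) none

-- the common reference: first candidate with a match wins
def pvSpec (header : List String) : List String → Option Int
  | [] => none
  | c :: cs => match pvBScan header c with | some i => some i | none => pvSpec header cs

-- ---- A side ----
theorem pvGet_fold (l : List (Int × String)) (d : PySem.Dict String Int) (c : String) :
    (l.foldl (fun d p => if p.2 ≠ "" then d.insert (pvNorm p.2) p.1 else d) d).get? c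
      = l.foldl (fun found p => if p.2 ≠ "" ∧ pvNorm p.2 = c then some p.1 else found) (d.get? c) := by
  induction l generalizing d with
  | nil => rfl
  | cons p rest ih =>
      simp only [List.foldl_cons]
      rw [ih]
      by_cases h1 : p.2 = ""
      · simp [h1]
      · by_cases h2 : pvNorm p.2 = c
        · simp [h1, h2, PySem.Dict.get?_insert_self]
        · rw [if_pos h1, if_neg (fun hc => h2 hc.2),
              PySem.Dict.get?_insert_of_ne _ _ (fun hc : c = pvNorm p.2 => h2 hc.symm)]

theorem pvScan_eq (header : List String) (c : String) :
    ((PySem.List.enumerate header 0).foldl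
      (fun d p => if p.2 ≠ "" then d.insert (pvNorm p.2) p.1 else d) PySem.Dict.empty).get? c
      = pvBScan header c := by
  rw [pvGet_fold]; rfl

theorem pvA_eq_spec (header : List String) (candidates : List String) (default_idx : Option Int) :
    detect_column_index_py header candidates default_idx
      = match pvSpec header candidates with
        | some i => some i
        | none => default_idx := by
  unfold detect_column_index_py
  induction candidates with
  | nil => rfl
  | cons c cs ih =>
      simp only [pvALoop, pvScan_eq, pvSpec]
      cases pvBScan header c with
      | some i => rfl
      | none => simpa using ih

-- ---- B side ----
theorem pvSetdefault_eq (d : PySem.Dict String Int) (k : String) (v : Int) :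
    d.setdefault k v = if d.contains k then d else d.insert k v := by
  simp only [PySem.Dict.setdefault]
  split_ifs with h
  · rfl
  · apply PySem.Dict.ext
    rw [PySem.Dict.items_insert_of_not_contains (h := by simp [h])]

-- setdefault never overwrites an existing binding
theorem pvSd_preserve (cs : List String) (n : Int) (d : PySem.Dict String Int) (x : String) (r : Int)
    (h : d.get? x = some r) :
    (((PySem.List.enumerate cs n).foldl (fun d p => d.setdefault p.2 p.1) d)).get? x = some r := by
  induction cs generalizing n d with
  | nil => simpa [PySem.List.enumerate] using h
  | cons a rest ih =>
      rw [PySem.List.enumerate_cons]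
      simp only [List.foldl_cons]
      apply ih
      rw [pvSetdefault_eq]
      split_ifs with hc
      · exact h
      · by_cases hx : x = a
        · exfalso
          rw [PySem.Dict.contains_eq_isSome_get?] at hc
          rw [hx] at h
          simp [h] at hc
        · rw [PySem.Dict.get?_insert_of_ne _ _ hx]; exact h

theorem pvSd_notMem (cs : List String) (n : Int) (d : PySem.Dict String Int) (x : String)
    (hx : x ∉ cs) :
    (((PySem.List.enumerate cs n).foldl (fun d p => d.setdefault p.2 p.1) d)).get? x = d.get? x := by
  induction cs generalizing n d with
  | nil => simp [PySem.List.enumerate]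
  | cons a rest ih =>
      rw [PySem.List.enumerate_cons]
      simp only [List.foldl_cons]
      have hxa : x ≠ a := fun h => hx (h ▸ List.mem_cons_self)
      rw [ih _ _ (fun h => hx (List.mem_cons_of_mem _ h)), pvSetdefault_eq]
      split_ifs with hc
      · rfl
      · rw [PySem.Dict.get?_insert_of_ne _ _ hxa]

theorem pvSd_mem (cs : List String) (n : Int) (d : PySem.Dict String Int) (x : String)
    (hx : x ∈ cs) :
    ((((PySem.List.enumerate cs n).foldl (fun d p => d.setdefault p.2 p.1) d)).get? x).isSome := by
  induction cs generalizing n d with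
  | nil => cases hx
  | cons a rest ih =>
      rw [PySem.List.enumerate_cons]
      simp only [List.foldl_cons]
      by_cases hmem : x ∈ rest
      · exact ih _ _ hmem
      · have hxa : x = a := by
          rcases List.mem_cons.mp hx with h | h
          · exact h
          · exact absurd h hmem
        subst hxa
        have : ∃ r, (d.setdefault x n).get? x = some r := by
          rw [pvSetdefault_eq]
          split_ifs with hc
          · rw [PySem.Dict.contains_eq_isSome_get?] at hc
            exact Option.isSome_iff_exists.mp hc
          · exact ⟨n, PySem.Dict.get?_insert_self _ _ _⟩
        obtain ⟨r, hr⟩ := this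
        rw [pvSd_preserve _ _ _ _ _ hr]
        rfl

theorem pvSd_bound (cs : List String) (n : Int) (d : PySem.Dict String Int) (x : String) (r : Int)
    (h : (((PySem.List.enumerate cs n).foldl (fun d p => d.setdefault p.2 p.1) d)).get? x = some r) :
    d.get? x = some r ∨ (n ≤ r ∧ r < n + cs.length) := by
  induction cs generalizing n d with
  | nil => left; simpa [PySem.List.enumerate] using h
  | cons a rest ih =>
      rw [PySem.List.enumerate_cons] at h
      simp only [List.foldl_cons] at h
      rcases ih _ _ h with h' | h'
      · rw [pvSetdefault_eq] at h'
        split_ifs at h' with hc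
        · left; exact h'
        · by_cases hx : x = a
          · subst hx
            rw [PySem.Dict.get?_insert_self] at h'
            right
            have : r = n := by injection h'.symm
            subst this
            simp only [List.length_cons]
            constructor
            · omega
            · push_cast; omega
          · left; rw [PySem.Dict.get?_insert_of_ne _ _ hx] at h'; exact h'
      · right
        simp only [List.length_cons]
        push_cast
        omega

theorem pvRank_bound (cs : List String) (x : String) (r : Int)
    (h : (pvRank cs).get? x = some r) : 0 ≤ r ∧ r < cs.length := by
  rcases pvSd_bound cs 0 PySem.Dict.empty x r h with h' | h'
  · rw [PySem.Dict.get?_empty] at h'; cases h'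
  · omega

theorem pvRank_notMem (cs : List String) (x : String) (hx : x ∉ cs) :
    (pvRank cs).get? x = none := by
  rw [pvRank, pvSd_notMem _ _ _ _ hx, PySem.Dict.get?_empty]

-- appending one candidate to the rank table
theorem pvRank_append (cs : List String) (c : String) :
    pvRank (cs ++ [c])
      = if c ∈ cs then pvRank cs else (pvRank cs).insert c cs.length := by
  unfold pvRank
  rw [PySem.List.enumerate_append]
  rw [List.foldl_append]
  rw [PySem.List.enumerate_cons]
  simp only [List.foldl_cons, PySem.List.enumerate_nil, List.foldl_nil]
  rw [pvSetdefault_eq]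
  have hmem : ((PySem.List.enumerate cs 0).foldl (fun d p => d.setdefault p.2 p.1) PySem.Dict.empty).contains c = decide (c ∈ cs) := by
    by_cases hc : c ∈ cs
    · rw [PySem.Dict.contains_eq_isSome_get?]
      have := pvSd_mem cs 0 PySem.Dict.empty c hc
      simp [this, hc]
    · rw [PySem.Dict.contains_eq_isSome_get?, pvSd_notMem _ _ _ _ hc, PySem.Dict.get?_empty]
      simp [hc]
  rw [hmem]
  by_cases hc : c ∈ cs <;> simp [hc]

-- once best_idx is set it stays set
theorem pvSomeStays (R : PySem.Dict String Int) (l : List (Int × String)) (s : Int × Option Int)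
    (h : s.2.isSome) : ((l.foldl (pvStep R) s)).2.isSome := by
  induction l generalizing s with
  | nil => exact h
  | cons p rest ih =>
      simp only [List.foldl_cons]
      apply ih
      unfold pvStep
      split_ifs with h1
      · cases hr : R.get? (pvNorm p.2) with
        | some r => by_cases hle : r ≤ s.1 <;> simp [hle, h]
        | none => exact h
      · exact h

theorem pvEmptyFold (l : List (Int × String)) (s : Int × Option Int) :
    l.foldl (pvStep PySem.Dict.empty) s = s := by
  induction l generalizing s with
  | nil => rfl
  | cons p rest ih =>
      simp only [List.foldl_cons]
      rw [show pvStep PySem.Dict.empty s p = s by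
        unfold pvStep; split_ifs <;> simp [PySem.Dict.get?_empty]]
      exact ih s

-- after the state's rank dropped below n, one extra key c ↦ n in the table is invisible
theorem pvEqLow (R : PySem.Dict String Int) (c : String) (n : Int)
    (hR : ∀ x r, R.get? x = some r → r < n) (hc : R.get? c = none)
    (l : List (Int × String)) (s : Int × Option Int) (hs : s.1 < n) :
    l.foldl (pvStep (R.insert c n)) s = l.foldl (pvStep R) s := by
  induction l generalizing s with
  | nil => rfl
  | cons p rest ih =>
      simp only [List.foldl_cons]
      by_cases h1 : p.2 = ""
      · rw [show pvStep (R.insert c n) s p = s by unfold pvStep; simp [h1],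
            show pvStep R s p = s by unfold pvStep; simp [h1]]
        exact ih s hs
      · by_cases h2 : pvNorm p.2 = c
        · rw [show pvStep (R.insert c n) s p = s by
              unfold pvStep
              rw [if_pos h1, h2, PySem.Dict.get?_insert_self]
              simp only
              rw [if_neg (by omega)],
            show pvStep R s p = s by
              unfold pvStep; rw [if_pos h1, h2, hc]]
          exact ih s hs
        · have hne : pvNorm p.2 ≠ c := h2
          have hget : (R.insert c n).get? (pvNorm p.2) = R.get? (pvNorm p.2) :=
            PySem.Dict.get?_insert_of_ne _ _ hne
          cases hr : R.get? (pvNorm p.2) with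
          | none =>
              rw [show pvStep (R.insert c n) s p = s by unfold pvStep; rw [if_pos h1, hget, hr],
                  show pvStep R s p = s by unfold pvStep; rw [if_pos h1, hr]]
              exact ih s hs
          | some r =>
              have hrn : r < n := hR _ _ hr
              by_cases hle : r ≤ s.1
              · rw [show pvStep (R.insert c n) s p = (r, some p.1) by
                    unfold pvStep; rw [if_pos h1, hget, hr]; simp [hle],
                    show pvStep R s p = (r, some p.1) by
                    unfold pvStep; rw [if_pos h1, hr]; simp [hle]]
                exact ih (r, some p.1) hrn
              · rw [show pvStep (R.insert c n) s p = s by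
                    unfold pvStep; rw [if_pos h1, hget, hr]; simp [hle],
                    show pvStep R s p = s by
                    unfold pvStep; rw [if_pos h1, hr]; simp [hle]]
                exact ih s hs

-- the initial best_rank is irrelevant as long as it dominates every rank
theorem pvB0irrel (R : PySem.Dict String Int) (b0 b0' : Int)
    (hR : ∀ x r, R.get? x = some r → r ≤ b0 ∧ r ≤ b0')
    (l : List (Int × String)) :
    l.foldl (pvStep R) (b0', none)
      = if ((l.foldl (pvStep R) (b0, none))).2.isSome
          then l.foldl (pvStep R) (b0, none) else (b0', none) := by
  induction l with
  | nil => simp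
  | cons p rest ih =>
      simp only [List.foldl_cons]
      by_cases h1 : p.2 = ""
      · rw [show pvStep R (b0', none) p = (b0', none) by unfold pvStep; simp [h1],
            show pvStep R (b0, none) p = (b0, none) by unfold pvStep; simp [h1]]
        exact ih
      · cases hr : R.get? (pvNorm p.2) with
        | none =>
            rw [show pvStep R (b0', none) p = (b0', none) by unfold pvStep; rw [if_pos h1, hr],
                show pvStep R (b0, none) p = (b0, none) by unfold pvStep; rw [if_pos h1, hr]]
            exact ih
        | some r =>
            obtain ⟨hb, hb'⟩ := hR _ _ hr
            rw [show pvStep R (b0', none) p = (r, some p.1) by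
                  unfold pvStep; rw [if_pos h1, hr]; simp [hb'],
                show pvStep R (b0, none) p = (r, some p.1) by
                  unfold pvStep; rw [if_pos h1, hr]; simp [hb]]
            have hst := pvSomeStays R rest (r, some p.1) rfl
            simp [hst]

def pvMk (b0' n : Int) : Option Int → Int × Option Int
  | none => (b0', none)
  | some j => (n, some j)

theorem pvMk_snd (b0' n : Int) (o : Option Int) : (pvMk b0' n o).2 = o := by
  cases o <;> rfl

-- adding one fresh candidate of maximal rank n: it only matters if no old candidate matches
theorem pvT (R : PySem.Dict String Int) (c : String) (n b0 b0' : Int)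
    (hR : ∀ x r, R.get? x = some r → r < n) (hc : R.get? c = none)
    (hb : n ≤ b0) (hb' : n ≤ b0')
    (l : List (Int × String)) (acc : Option Int) :
    l.foldl (pvStep (R.insert c n)) (pvMk b0' n acc)
      = if ((l.foldl (pvStep R) (b0, none))).2.isSome
          then l.foldl (pvStep R) (b0, none)
          else pvMk b0' n
            (l.foldl (fun found p => if p.2 ≠ "" ∧ pvNorm p.2 = c then some p.1 else found) acc) := by
  induction l generalizing acc with
  | nil => simp [pvMk]
  | cons p rest ih =>
      simp only [List.foldl_cons]
      by_cases h1 : p.2 = ""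
      · have e1 : pvStep (R.insert c n) (pvMk b0' n acc) p = pvMk b0' n acc := by
          unfold pvStep; simp [h1]
        have e2 : pvStep R (b0, none) p = (b0, none) := by
          unfold pvStep; simp [h1]
        have e3 : (if p.2 ≠ "" ∧ pvNorm p.2 = c then some p.1 else acc) = acc :=
          if_neg (by simp [h1])
        rw [e1, e2, e3]
        exact ih acc
      · by_cases h2 : pvNorm p.2 = c
        · have e1 : pvStep (R.insert c n) (pvMk b0' n acc) p = pvMk b0' n (some p.1) := by
            unfold pvStep
            rw [if_pos h1, h2, PySem.Dict.get?_insert_self]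
            cases acc <;> simp [pvMk] <;> omega
          have e2 : pvStep R (b0, none) p = (b0, none) := by
            unfold pvStep; rw [if_pos h1, h2, hc]
          have e3 : (if p.2 ≠ "" ∧ pvNorm p.2 = c then some p.1 else acc) = some p.1 :=
            if_pos ⟨h1, h2⟩
          rw [e1, e2, e3]
          exact ih (some p.1)
        · have hne : pvNorm p.2 ≠ c := h2
          have hget : (R.insert c n).get? (pvNorm p.2) = R.get? (pvNorm p.2) :=
            PySem.Dict.get?_insert_of_ne _ _ hne
          have e3 : (if p.2 ≠ "" ∧ pvNorm p.2 = c then some p.1 else acc) = acc :=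
            if_neg (fun hx => h2 hx.2)
          cases hr : R.get? (pvNorm p.2) with
          | none =>
              have e1 : pvStep (R.insert c n) (pvMk b0' n acc) p = pvMk b0' n acc := by
                unfold pvStep; rw [if_pos h1, hget, hr]
              have e2 : pvStep R (b0, none) p = (b0, none) := by
                unfold pvStep; rw [if_pos h1, hr]
              rw [e1, e2, e3]
              exact ih acc
          | some r =>
              have hrn : r < n := hR _ _ hr
              have e1 : pvStep (R.insert c n) (pvMk b0' n acc) p = (r, some p.1) := by
                unfold pvStep
                rw [if_pos h1, hget, hr]
                cases acc <;> simp [pvMk] <;> omega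
              have e2 : pvStep R (b0, none) p = (r, some p.1) := by
                unfold pvStep
                rw [if_pos h1, hr]
                simp only
                rw [if_pos (by omega)]
              rw [e1, e2, e3, pvEqLow R c n hR hc rest (r, some p.1) hrn]
              have hst := pvSomeStays R rest (r, some p.1) rfl
              simp [hst]

-- pvSpec over an appended candidate
theorem pvSpec_append (header : List String) (cs : List String) (c : String) :
    pvSpec header (cs ++ [c])
      = match pvSpec header cs with
        | some i => some i
        | none => pvBScan header c := by
  induction cs with
  | nil =>
      simp only [List.nil_append, pvSpec]
      cases pvBScan header c <;> rfl
  | cons a rest ih =>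
      simp only [List.cons_append, pvSpec, ih]
      cases pvBScan header a <;> rfl

theorem pvSpec_none (header : List String) (cs : List String)
    (h : pvSpec header cs = none) (c : String) (hc : c ∈ cs) :
    pvBScan header c = none := by
  induction cs with
  | nil => cases hc
  | cons a rest ih =>
      simp only [pvSpec] at h
      cases ha : pvBScan header a with
      | some i => rw [ha] at h; cases h
      | none =>
          rw [ha] at h
          rcases List.mem_cons.mp hc with h' | h'
          · subst h'; exact ha
          · exact ih h h'

-- B's fold computes the first-candidate-match answer
theorem pvMainB (header : List String) (cs : List String) :
    (((PySem.List.enumerate header 0).foldl (pvStep (pvRank cs)) ((cs.length : Int), none))).2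
      = pvSpec header cs := by
  induction cs using List.reverseRecOn with
  | nil =>
      rw [show pvRank [] = PySem.Dict.empty from rfl, pvEmptyFold]
      rfl
  | append_singleton cs c ih =>
      rw [pvRank_append]
      have hlen : (((cs ++ [c]).length : Int)) = (cs.length : Int) + 1 := by
        simp
      by_cases hc : c ∈ cs
      · rw [if_pos hc, hlen]
        rw [pvB0irrel (pvRank cs) (cs.length) ((cs.length : Int) + 1)
              (fun x r h => by have := pvRank_bound cs x r h; omega)]
        rw [pvSpec_append]
        cases hspec : pvSpec header cs with
        | some i =>
            have h2 : (((PySem.List.enumerate header 0).foldl (pvStep (pvRank cs)) ((cs.length : Int), none))).2 = some i := by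
              rw [ih, hspec]
            simp [h2]
        | none =>
            have h2 : (((PySem.List.enumerate header 0).foldl (pvStep (pvRank cs)) ((cs.length : Int), none))).2 = none := by
              rw [ih, hspec]
            simp only [h2, Option.isSome_none, Bool.false_eq_true, if_false]
            exact (pvSpec_none header cs hspec c hc).symm
      · rw [if_neg hc, hlen]
        have hmk : (((cs.length : Int) + 1, (none : Option Int))) = pvMk ((cs.length : Int) + 1) (cs.length) none := rfl
        rw [hmk, pvT (pvRank cs) c (cs.length) (cs.length) ((cs.length : Int) + 1)
              (fun x r h => (pvRank_bound cs x r h).2) (pvRank_notMem cs c hc)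
              le_rfl (by omega) (PySem.List.enumerate header 0) none]
        rw [pvSpec_append]
        cases hspec : pvSpec header cs with
        | some i =>
            have h2 : (((PySem.List.enumerate header 0).foldl (pvStep (pvRank cs)) ((cs.length : Int), none))).2 = some i := by
              rw [ih, hspec]
            simp [h2]
        | none =>
            have h2 : (((PySem.List.enumerate header 0).foldl (pvStep (pvRank cs)) ((cs.length : Int), none))).2 = none := by
              rw [ih, hspec]
            simp only [h2, Option.isSome_none, Bool.false_eq_true, if_false]
            rw [pvMk_snd]
            rfl

-- ===== VERDICT =====
theorem detect_column_index_py_spec : Claim_equal_detect_column_index_py := by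
  intro header candidates default_idx _
  unfold Spec_detect_column_index_py
  rw [pvA_eq_spec]
  show _ = (match (((PySem.List.enumerate header 0).foldl (pvStep (pvRank candidates)) ((candidates.length : Int), none))).2 with
    | some i => some i
    | none => default_idx)
  rw [pvMainB]
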